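-- pv_equiv track=rewrite | github.com/Julesc013/dominium | src/control/negotiation/negotiation_kernel.py | _view_downgrade_target
-- ===== SOURCE A (Python) =====
-- from typing import Dict, List, Mapping, Sequence, Tuple
--
-- def _view_mode_for_policy(view_policy_id: str) -> str:
--     token = str(view_policy_id or "").strip().lower()
--     if not token:
--         return "unknown"
--     if "freecam" in token or token.endswith(".freecam") or ".free." in token:
--         return "freecam"
--     if "third_person" in token or "third.person" in token or "third_person" in token:
--         return "third_person"
--     if "first_person" in token or "first.person" in token or "first_person" in token:
--         return "first_person"
--     if "spectator" in token:
--         return "spectator"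
--     if "replay" in token:
--         return "replay"
--     return "unknown"
--
-- def _first_view_by_mode(values: Sequence[str], mode: str) -> str:
--     target_mode = str(mode or "").strip()
--     rows = [
--         str(token).strip()
--         for token in list(values or [])
--         if str(token).strip() and _view_mode_for_policy(str(token)) == target_mode
--     ]
--     if not rows:
--         return ""
--     return sorted(set(rows))[0]
--
-- def _view_downgrade_target(allowed_view: Sequence[str], requested_view: str) -> str:
--     requested_mode = _view_mode_for_policy(requested_view)
--     if requested_mode == "freecam":
--         for mode in ("third_person", "first_person"):
--             candidate = _first_view_by_mode(allowed_view, mode)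
--             if candidate:
--                 return candidate
--         return ""
--     if requested_mode == "third_person":
--         return _first_view_by_mode(allowed_view, "first_person")
--     return ""
-- ===== SOURCE B (Python) =====
-- def _view_mode_for_policy(view_policy_id: str) -> str:
--     token = str(view_policy_id or "").strip().lower()
--     if not token:
--         return "unknown"
--     if "freecam" in token or token.endswith(".freecam") or ".free." in token:
--         return "freecam"
--     if "third_person" in token or "third.person" in token or "third_person" in token:
--         return "third_person"
--     if "first_person" in token or "first.person" in token or "first_person" in token:
--         return "first_person"
--     if "spectator" in token:
--         return "spectator"
--     if "replay" in token:
--         return "replay"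
--     return "unknown"
--
--
-- def _view_downgrade_target(allowed_view, requested_view: str) -> str:
--     # One pass: index mode -> lexicographically smallest stripped token of that mode.
--     best = {}
--     for token in list(allowed_view or []):
--         t = str(token).strip()
--         if not t:
--             continue
--         m = _view_mode_for_policy(str(token))
--         if m not in best or t < best[m]:
--             best[m] = t
--     requested_mode = _view_mode_for_policy(requested_view)
--     if requested_mode == "freecam":
--         return best.get("third_person") or best.get("first_person") or ""
--     if requested_mode == "third_person":
--         return best.get("first_person", "")
--     return ""
-- ===== Notes on version B (the rewrite author's own statement) =====
-- stated objective: alternative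
-- what changed: Replaced A's per-mode filtered scans (up to two full passes, each deduping and sorting to take the smallest) with a single grouping pass that maintains a dict mode -> lexicographically smallest stripped token, followed by table lookups.
import Mathlib
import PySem

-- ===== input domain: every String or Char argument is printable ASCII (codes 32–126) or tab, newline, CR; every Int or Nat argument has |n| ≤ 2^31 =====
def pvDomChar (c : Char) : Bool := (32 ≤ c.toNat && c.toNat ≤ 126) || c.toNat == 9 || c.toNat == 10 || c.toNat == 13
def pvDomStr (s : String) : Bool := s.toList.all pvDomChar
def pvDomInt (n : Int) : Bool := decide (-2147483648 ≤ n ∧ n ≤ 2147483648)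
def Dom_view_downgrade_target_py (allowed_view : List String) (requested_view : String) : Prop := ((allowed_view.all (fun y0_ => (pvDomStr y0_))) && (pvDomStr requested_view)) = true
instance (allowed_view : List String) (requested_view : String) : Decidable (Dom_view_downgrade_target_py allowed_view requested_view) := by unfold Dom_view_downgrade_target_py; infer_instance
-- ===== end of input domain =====

-- B replaces A's repeated filtered scans + sort-then-head with one grouping pass that keeps,
-- per view mode, the lexicographically smallest stripped token, then a table lookup (objective: alternative).


-- ===== PORT A =====
-- shared helper: _view_mode_for_policy (identical in Source A and Source B)
def viewModeForPolicy (view_policy_id : String) : String :=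
  let token := PySem.Str.lower (PySem.Str.strip view_policy_id)
  if token = "" then "unknown"
  else if PySem.Str.isIn "freecam" token || PySem.Str.endswith token ".freecam" || PySem.Str.isIn ".free." token then "freecam"
  else if PySem.Str.isIn "third_person" token || PySem.Str.isIn "third.person" token || PySem.Str.isIn "third_person" token then "third_person"
  else if PySem.Str.isIn "first_person" token || PySem.Str.isIn "first.person" token || PySem.Str.isIn "first_person" token then "first_person"
  else if PySem.Str.isIn "spectator" token then "spectator"
  else if PySem.Str.isIn "replay" token then "replay"
  else "unknown"

-- _first_view_by_mode
def firstViewByMode (values : List String) (mode : String) : String :=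
  let targetMode := PySem.Str.strip mode
  let rows := (values.filter (fun token => (PySem.Str.strip token != "") && (viewModeForPolicy token == targetMode))).map
    (fun token => PySem.Str.strip token)
  if rows = [] then ""
  else (PySem.List.sorted (PySem.Set.ofList rows) id).headD ""

def view_downgrade_target_py (allowed_view : List String) (requested_view : String) : String :=
  let requested_mode := viewModeForPolicy requested_view
  if requested_mode == "freecam" then
    -- for mode in ("third_person", "first_person"): …
    let c1 := firstViewByMode allowed_view "third_person"
    if c1 != "" then c1
    else
      let c2 := firstViewByMode allowed_view "first_person"
      if c2 != "" then c2 else ""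
  else if requested_mode == "third_person" then
    firstViewByMode allowed_view "first_person"
  else ""

-- ===== PORT B =====
-- one loop iteration of B: keep per mode the smallest stripped token
def bestStep (best : PySem.Dict String String) (token : String) : PySem.Dict String String :=
  let t := PySem.Str.strip token
  if t == "" then best
  else
    let m := viewModeForPolicy token
    match best.get? m with
    | none => best.insert m t
    | some cur => if t < cur then best.insert m t else best

-- Python truthiness of `x or y` where x is an Optional[str]
def truthyD (o : Option String) (d : String) : String :=
  match o with
  | some v => if v == "" then d else v
  | none => d

def view_downgrade_target_py_alt (allowed_view : List String) (requested_view : String) : String :=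
  let best := allowed_view.foldl bestStep PySem.Dict.empty
  let requested_mode := viewModeForPolicy requested_view
  if requested_mode == "freecam" then
    truthyD (best.get? "third_person") (truthyD (best.get? "first_person") "")
  else if requested_mode == "third_person" then
    best.getD "first_person" ""
  else ""

-- ===== PRECONDITION & SPEC =====
def Spec_view_downgrade_target_py (allowed_view : List String) (requested_view : String) (out : String) : Prop := out = view_downgrade_target_py_alt allowed_view requested_view
instance (allowed_view : List String) (requested_view : String) (out : String) : Decidable (Spec_view_downgrade_target_py allowed_view requested_view out) := by unfold Spec_view_downgrade_target_py; infer_instance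

-- ===== CLAIM (what is proved, stated in full; the proofs are below) =====
def Claim_equal_view_downgrade_target_py : Prop := ∀ (allowed_view : List String) (requested_view : String), Dom_view_downgrade_target_py allowed_view requested_view → Spec_view_downgrade_target_py allowed_view requested_view (view_downgrade_target_py allowed_view requested_view)

-- ===== LEMMAS AND PROOFS =====

-- the stripped tokens of `values` whose mode is `m` (A's `rows`, when `m` is already stripped)
def rowsFor (values : List String) (m : String) : List String :=
  (values.filter (fun token => (PySem.Str.strip token != "") && (viewModeForPolicy token == m))).map
    (fun token => PySem.Str.strip token)

-- running minimum, as B's loop maintains it for one mode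
def minOpt : Option String → List String → Option String
  | o, [] => o
  | none, x :: xs => minOpt (some x) xs
  | some a, x :: xs => minOpt (some (if x < a then x else a)) xs

theorem minOpt_some (xs : List String) : ∀ a : String, ∃ b : String,
    minOpt (some a) xs = some b ∧ (b = a ∨ b ∈ xs) ∧ b ≤ a ∧ ∀ y ∈ xs, b ≤ y := by
  induction xs with
  | nil => intro a; exact ⟨a, rfl, Or.inl rfl, le_refl a, by simp⟩
  | cons x xs ih =>
    intro a
    obtain ⟨b, hb, hmem, hle, hall⟩ := ih (if x < a then x else a)
    have hmin : (if x < a then x else a) ≤ a ∧ (if x < a then x else a) ≤ x ∧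
        ((if x < a then x else a) = x ∨ (if x < a then x else a) = a) := by
      split_ifs with hx
      · exact ⟨le_of_lt hx, le_refl x, Or.inl rfl⟩
      · exact ⟨le_refl a, le_of_not_gt hx, Or.inr rfl⟩
    refine ⟨b, by simpa [minOpt] using hb, ?_, le_trans hle hmin.1, ?_⟩
    · rcases hmem with h | h
      · rcases hmin.2.2 with h2 | h2
        · exact Or.inr (by rw [h, h2]; exact List.mem_cons_self)
        · exact Or.inl (h.trans h2)
      · exact Or.inr (List.mem_cons_of_mem _ h)
    · intro y hy
      rcases List.mem_cons.mp hy with h | h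
      · exact h ▸ le_trans hle hmin.2.1
      · exact hall y h

theorem minOpt_none (xs : List String) (hne : xs ≠ []) : ∃ b : String,
    minOpt none xs = some b ∧ b ∈ xs ∧ ∀ y ∈ xs, b ≤ y := by
  cases xs with
  | nil => exact absurd rfl hne
  | cons x xs =>
    obtain ⟨b, hb, hmem, hle, hall⟩ := minOpt_some xs x
    refine ⟨b, hb, ?_, ?_⟩
    · rcases hmem with h | h
      · exact h ▸ List.mem_cons_self
      · exact List.mem_cons_of_mem _ h
    · intro y hy
      rcases List.mem_cons.mp hy with h | h
      · exact h ▸ hle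
      · exact hall y h

theorem rowsFor_ne_empty_str (values : List String) (m : String) :
    ∀ y ∈ rowsFor values m, y ≠ "" := by
  intro y hy
  simp only [rowsFor, List.mem_map, List.mem_filter] at hy
  obtain ⟨t, ⟨_, hp⟩, rfl⟩ := hy
  simp only [Bool.and_eq_true, bne_iff_ne, ne_eq] at hp
  exact hp.1

-- B's loop invariant: the dict entry for m is the running minimum of rowsFor
theorem bestStep_invariant (values : List String) :
    ∀ (d : PySem.Dict String String) (m : String),
    (values.foldl bestStep d).get? m = minOpt (d.get? m) (rowsFor values m) := by
  induction values with
  | nil => intro d m; simp [rowsFor, minOpt]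
  | cons v vs ih =>
    intro d m
    simp only [List.foldl_cons]
    rw [ih]
    by_cases hs : PySem.Str.strip v = ""
    · have h1 : bestStep d v = d := by simp [bestStep, hs]
      have h2 : rowsFor (v :: vs) m = rowsFor vs m := by
        simp [rowsFor, hs]
      rw [h1, h2]
    · by_cases hm : viewModeForPolicy v = m
      · have h2 : rowsFor (v :: vs) m = PySem.Str.strip v :: rowsFor vs m := by
          simp [rowsFor, hs, hm]
        rw [h2]
        subst hm
        cases hget : d.get? (viewModeForPolicy v) with
        | none =>
          have h1 : (bestStep d v).get? (viewModeForPolicy v) = some (PySem.Str.strip v) := by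
            simp only [bestStep, hget]
            simp [hs, PySem.Dict.get?_insert_self]
          rw [h1]
          simp [minOpt]
        | some cur =>
          by_cases hlt : PySem.Str.strip v < cur
          · have h1 : (bestStep d v).get? (viewModeForPolicy v) = some (PySem.Str.strip v) := by
              simp only [bestStep, hget]
              simp [hs, hlt, PySem.Dict.get?_insert_self]
            rw [h1]
            simp [minOpt, hlt]
          · have h1 : (bestStep d v).get? (viewModeForPolicy v) = some cur := by
              simp only [bestStep, hget]
              simp [hs, hlt, hget]
            rw [h1]
            simp [minOpt, hlt]
      · have h2 : rowsFor (v :: vs) m = rowsFor vs m := by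
          simp [rowsFor, hm]
        have h1 : (bestStep d v).get? m = d.get? m := by
          simp only [bestStep]
          cases hget : d.get? (viewModeForPolicy v) with
          | none =>
            simp only [beq_iff_eq, if_neg hs]
            exact PySem.Dict.get?_insert_of_ne d (PySem.Str.strip v) (fun h => hm h.symm)
          | some cur =>
            by_cases hlt : PySem.Str.strip v < cur
            · simp only [beq_iff_eq, if_neg hs, if_pos hlt]
              exact PySem.Dict.get?_insert_of_ne d (PySem.Str.strip v) (fun h => hm h.symm)
            · simp only [beq_iff_eq, if_neg hs, if_neg hlt]
        rw [h1, h2]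

-- A's result for a stripped mode is the minimum of rowsFor
theorem firstViewByMode_eq_min (values : List String) (m : String)
    (hm : PySem.Str.strip m = m) :
    firstViewByMode values m = (minOpt none (rowsFor values m)).getD "" := by
  unfold firstViewByMode
  rw [hm]
  show (if rowsFor values m = [] then ""
        else (PySem.List.sorted (PySem.Set.ofList (rowsFor values m)) id).headD "") = _
  by_cases hr : rowsFor values m = []
  · simp [hr, minOpt]
  · obtain ⟨b, hb, hbmem, hball⟩ := minOpt_none _ hr
    rw [hb]
    simp only [hr, Option.getD_some]
    -- the sorted dedup list
    have hperm : (PySem.List.sorted (PySem.Set.ofList (rowsFor values m)) id).Perm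
        (PySem.Set.ofList (rowsFor values m)) := PySem.List.sorted_perm _ id false
    have hpw : List.Pairwise (fun a b => id a ≤ id b)
        (PySem.List.sorted (PySem.Set.ofList (rowsFor values m)) id) :=
      PySem.List.sorted_pairwise _ id
    cases hsort : PySem.List.sorted (PySem.Set.ofList (rowsFor values m)) id with
    | nil =>
      exfalso
      have : b ∈ PySem.Set.ofList (rowsFor values m) := (PySem.Set.mem_ofList _ _).mpr hbmem
      have := hperm.mem_iff.mpr this
      rw [hsort] at this
      simp at this
    | cons h t =>
      rw [hsort] at hperm hpw
      have hh_mem : h ∈ rowsFor values m := by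
        have : h ∈ PySem.Set.ofList (rowsFor values m) := hperm.mem_iff.mp List.mem_cons_self
        exact (PySem.Set.mem_ofList _ _).mp this
      have hb_in : b ∈ h :: t := by
        exact hperm.mem_iff.mpr ((PySem.Set.mem_ofList _ _).mpr hbmem)
      have h_le_b : h ≤ b := by
        rcases List.mem_cons.mp hb_in with hbh | hbt
        · exact le_of_eq hbh.symm
        · exact (List.pairwise_cons.mp hpw).1 b hbt
      have b_le_h : b ≤ h := hball h hh_mem
      simp [le_antisymm h_le_b b_le_h]

-- what both dispatch branches need, for one stripped mode
theorem mode_lookup (values : List String) (m : String) (hm : PySem.Str.strip m = m) :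
    firstViewByMode values m = ((values.foldl bestStep PySem.Dict.empty).get? m).getD "" ∧
    (∀ v, (values.foldl bestStep PySem.Dict.empty).get? m = some v → v ≠ "") := by
  have hinv := bestStep_invariant values PySem.Dict.empty m
  have hempty : (PySem.Dict.empty : PySem.Dict String String).get? m = none := by
    simp [PySem.Dict.empty, PySem.Dict.get?]
  rw [hempty] at hinv
  constructor
  · rw [firstViewByMode_eq_min values m hm, hinv]
  · intro v hv
    rw [hinv] at hv
    by_cases hr : rowsFor values m = []
    · rw [hr] at hv; simp [minOpt] at hv
    · obtain ⟨b, hb, hbmem, _⟩ := minOpt_none _ hr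
      rw [hb] at hv
      cases hv
      exact rowsFor_ne_empty_str values m _ hbmem

-- ===== VERDICT (by name: the statement is the Claim_ definition above) =====
theorem view_downgrade_target_py_spec : Claim_equal_view_downgrade_target_py := by
  intro allowed_view requested_view _
  unfold Spec_view_downgrade_target_py view_downgrade_target_py view_downgrade_target_py_alt
  obtain ⟨h3, h3ne⟩ := mode_lookup allowed_view "third_person" (by decide)
  obtain ⟨h1, h1ne⟩ := mode_lookup allowed_view "first_person" (by decide)
  by_cases hf : viewModeForPolicy requested_view == "freecam"
  · simp only [hf, if_pos]
    cases hg3 : (allowed_view.foldl bestStep PySem.Dict.empty).get? "third_person" with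
    | some v =>
      have hv : v ≠ "" := h3ne v hg3
      rw [hg3] at h3
      simp only [Option.getD_some] at h3
      simp [truthyD, h3, hv]
    | none =>
      rw [hg3] at h3
      simp only [Option.getD_none] at h3
      cases hg1 : (allowed_view.foldl bestStep PySem.Dict.empty).get? "first_person" with
      | some w =>
        have hw : w ≠ "" := h1ne w hg1
        rw [hg1] at h1
        simp only [Option.getD_some] at h1
        simp [truthyD, h1, h3, hw]
      | none =>
        rw [hg1] at h1
        simp only [Option.getD_none] at h1
        simp [truthyD, h1, h3]
  · by_cases ht : viewModeForPolicy requested_view == "third_person"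
    · simp only [hf, ht, if_pos, if_neg, Bool.false_eq_true, not_false_eq_true]
      rw [h1]
      simp [PySem.Dict.getD, PySem.Dict.get?]
    · simp [hf, ht]
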